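-- pv_equiv track=rewrite | github.com/mach-hub-g1/ACC45DAYSOFCODE-2024 | Day10-WGHTS.py | can_measure_weight
-- ===== SOURCE A (Python) =====
-- def can_measure_weight(T, test_cases):
--     results = []
--     for i in range(T):
--         W, X, Y, Z = test_cases[i]
--
--         # Check all combinations
--         if (W == X or
--             W == Y or
--             W == Z or
--             W == X + Y or
--             W == X + Z or
--             W == Y + Z or
--             W == X + Y + Z):
--             results.append("YES")
--         else:
--             results.append("NO")
--
--     return results
-- ===== SOURCE B (Python) =====
-- def _reach(w, ws, taken):
--     # include/exclude recursion over the remaining weights: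
--     # True iff some subset of ws (non-empty unless taken) sums to w
--     if not ws:
--         return taken and w == 0
--     return _reach(w, ws[1:], taken) or _reach(w - ws[0], ws[1:], True)
--
--
-- def can_measure_weight(T, test_cases):
--     if T <= 0:
--         return []
--     W, X, Y, Z = test_cases[0]
--     first = "YES" if _reach(W, [X, Y, Z], False) else "NO"
--     return [first] + can_measure_weight(T - 1, test_cases[1:])
-- ===== Notes on version B (the rewrite author's own statement) =====
-- stated objective: alternative
-- what changed: B solves each case by a generic include/exclude subset-sum recursion over the list of weights (with a 'taken' flag to exclude the empty subset) and builds the result list by structural recursion on the test cases, instead of A's indexed loop with a hard-coded seven-way disjunction.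
import Mathlib
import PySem

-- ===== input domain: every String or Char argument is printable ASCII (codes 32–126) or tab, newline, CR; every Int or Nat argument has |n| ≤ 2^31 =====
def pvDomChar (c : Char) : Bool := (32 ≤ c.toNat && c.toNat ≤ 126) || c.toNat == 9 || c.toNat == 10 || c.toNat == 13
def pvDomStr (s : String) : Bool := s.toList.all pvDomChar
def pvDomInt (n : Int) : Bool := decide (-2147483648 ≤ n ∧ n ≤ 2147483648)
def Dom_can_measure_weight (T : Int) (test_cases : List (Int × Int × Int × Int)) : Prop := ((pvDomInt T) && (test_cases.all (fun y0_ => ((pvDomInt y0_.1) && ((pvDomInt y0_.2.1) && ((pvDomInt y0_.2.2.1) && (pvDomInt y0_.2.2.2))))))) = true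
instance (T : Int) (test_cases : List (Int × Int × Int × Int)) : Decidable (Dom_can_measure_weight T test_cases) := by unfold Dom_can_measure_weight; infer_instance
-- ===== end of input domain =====

-- B: per test case a generic include/exclude subset-sum recursion over the weight list replaces
-- A's hard-coded seven-way disjunction, and the result list is built by structural recursion
-- on the test cases instead of A's indexed range loop (alternative decomposition, same cost).


-- ===== PORT A =====
-- one test case's if-condition / appended string; pyGetD's default is only reached outside Pre_
def cmwCase (c : Int × Int × Int × Int) : String :=
  if (c.1 = c.2.1 ∨ c.1 = c.2.2.1 ∨ c.1 = c.2.2.2 ∨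
      c.1 = c.2.1 + c.2.2.1 ∨ c.1 = c.2.1 + c.2.2.2 ∨ c.1 = c.2.2.1 + c.2.2.2 ∨
      c.1 = c.2.1 + c.2.2.1 + c.2.2.2) then "YES" else "NO"

def can_measure_weight (T : Int) (test_cases : List (Int × Int × Int × Int)) : List String :=
  (PySem.List.pyRange 0 T 1).foldl
    (fun results i => results ++ [cmwCase (PySem.List.pyGetD test_cases i (0, 0, 0, 0))]) []

-- ===== PORT B =====
-- _reach: include/exclude recursion; true iff some subset of ws (non-empty unless taken) sums to w
def cmwReach (w : Int) (ws : List Int) (taken : Bool) : Bool :=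
  match ws with
  | [] => taken && decide (w = 0)
  | x :: rest => cmwReach w rest taken || cmwReach (w - x) rest true

def cmwVerdict (c : Int × Int × Int × Int) : String :=
  if cmwReach c.1 [c.2.1, c.2.2.1, c.2.2.2] false then "YES" else "NO"

-- structural recursion on test_cases; on [] with T > 0 the Python raises IndexError (outside Pre_)
def can_measure_weight_alt (T : Int) (test_cases : List (Int × Int × Int × Int)) : List String :=
  match test_cases with
  | [] => []
  | c :: rest => if T ≤ 0 then [] else cmwVerdict c :: can_measure_weight_alt (T - 1) rest

-- ===== PRECONDITION & SPEC =====
-- Pre_ excludes T > len(test_cases), where A raises IndexError on test_cases[i]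
def Pre_can_measure_weight (T : Int) (test_cases : List (Int × Int × Int × Int)) : Prop :=
  T ≤ (test_cases.length : Int)
instance (T : Int) (test_cases : List (Int × Int × Int × Int)) : Decidable (Pre_can_measure_weight T test_cases) := by unfold Pre_can_measure_weight; infer_instance
def pvWitness_can_measure_weight : Int × (List (Int × Int × Int × Int)) := (2, [(3, 1, 2, 5), (10, 1, 2, 3)])

def Spec_can_measure_weight (T : Int) (test_cases : List (Int × Int × Int × Int)) (out : List String) : Prop := out = can_measure_weight_alt T test_cases
instance (T : Int) (test_cases : List (Int × Int × Int × Int)) (out : List String) : Decidable (Spec_can_measure_weight T test_cases out) := by unfold Spec_can_measure_weight; infer_instance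

-- ===== CLAIM (what is proved, stated in full; the proofs are below) =====
def Claim_equal_can_measure_weight : Prop := ∀ (T : Int) (test_cases : List (Int × Int × Int × Int)), Dom_can_measure_weight T test_cases → Pre_can_measure_weight T test_cases → Spec_can_measure_weight T test_cases (can_measure_weight T test_cases)

-- ===== LEMMAS AND PROOFS =====

-- the include/exclude recursion on [X, Y, Z] decides exactly A's seven-way disjunction
theorem cmwReach_iff (W X Y Z : Int) :
    cmwReach W [X, Y, Z] false = true ↔
      (W = X ∨ W = Y ∨ W = Z ∨ W = X + Y ∨ W = X + Z ∨ W = Y + Z ∨ W = X + Y + Z) := by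
  simp [cmwReach]
  omega

-- per-case agreement
theorem cmwCase_eq (c : Int × Int × Int × Int) : cmwCase c = cmwVerdict c := by
  obtain ⟨W, X, Y, Z⟩ := c
  unfold cmwCase cmwVerdict
  by_cases h : W = X ∨ W = Y ∨ W = Z ∨ W = X + Y ∨ W = X + Z ∨ W = Y + Z ∨ W = X + Y + Z
  · rw [if_pos h, if_pos ((cmwReach_iff W X Y Z).mpr h)]
  · rw [if_neg h, if_neg (fun hc => h ((cmwReach_iff W X Y Z).mp hc))]

-- B's structural recursion = map over the first T test cases
theorem alt_eq_map (T : Int) (tc : List (Int × Int × Int × Int)) :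
    can_measure_weight_alt T tc = (tc.take T.toNat).map cmwVerdict := by
  induction tc generalizing T with
  | nil => simp [can_measure_weight_alt]
  | cons c rest ih =>
    unfold can_measure_weight_alt
    by_cases hT : T ≤ 0
    · rw [if_pos hT]
      have : T.toNat = 0 := by omega
      simp [this]
    · rw [if_neg hT, ih]
      have : T.toNat = (T - 1).toNat + 1 := by omega
      rw [this]
      simp

-- A's indexed range-fold = map over the first T elements (needs 0 ≤ T ≤ len)
theorem a_eq_map (tc : List (Int × Int × Int × Int)) (T : Int)
    (h0 : 0 ≤ T) (h1 : T ≤ (tc.length : Int)) :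
    (PySem.List.pyRange 0 T 1).foldl
      (fun results i => results ++ [cmwCase (PySem.List.pyGetD tc i (0, 0, 0, 0))]) []
      = (tc.take T.toNat).map cmwCase := by
  have hlen : (((tc.take T.toNat).length : Nat) : Int) = T := by simp; omega
  have hcong : ∀ (acc : List String) (i : Int), i ∈ PySem.List.pyRange 0 T 1 →
      acc ++ [cmwCase (PySem.List.pyGetD tc i (0, 0, 0, 0))]
        = acc ++ [cmwCase (PySem.List.pyGetD (tc.take T.toNat) i (0, 0, 0, 0))] := by
    intro acc i hi
    rw [PySem.List.mem_pyRange_one] at hi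
    have hiT : i.toNat < T.toNat := by omega
    have hlt : i.toNat < tc.length := by omega
    rw [PySem.List.pyGetD_eq_getElem tc _ hi.1 (by omega),
        PySem.List.pyGetD_eq_getElem (tc.take T.toNat) _ hi.1 (by rw [hlen]; omega),
        List.getElem_take]
  rw [PySem.List.foldl_congr_mem (PySem.List.pyRange 0 T 1)
        (fun results i => results ++ [cmwCase (PySem.List.pyGetD tc i (0, 0, 0, 0))])
        (fun results i => results ++ [cmwCase (PySem.List.pyGetD (tc.take T.toNat) i (0, 0, 0, 0))])
        [] (fun acc i hi => hcong acc i hi)]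
  have key := PySem.List.foldl_pyRange_zero_pyGetD (tc.take T.toNat) ((0 : Int), (0 : Int), (0 : Int), (0 : Int))
    (fun acc c => acc ++ [cmwCase c]) []
  simp only [PySem.List.len_eq, hlen] at key
  rw [key, PySem.List.foldl_append_singleton_eq_map]
  simp

-- ===== VERDICT (by name: the statement is the Claim_ definition above) =====
theorem can_measure_weight_spec : Claim_equal_can_measure_weight := by
  intro T tc _ hpre
  unfold Spec_can_measure_weight can_measure_weight
  rw [alt_eq_map]
  by_cases hT : T ≤ 0
  · rw [PySem.List.pyRange_one_eq_nil hT]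
    have : T.toNat = 0 := by omega
    simp [this]
  · rw [a_eq_map tc T (by omega) hpre]
    exact List.map_congr_left (fun c _ => cmwCase_eq c)
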